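-- pv_equiv track=rewrite | github.com/vutrung203/BaiVS_code | Python/Bai23_lientiep_nhieu_ptu.py | find_max_positive_subarray_start
-- ===== SOURCE A (Python) =====
-- def find_max_positive_subarray_start(arr):
--     max_len = 0
--     max_start = -1
--     current_len = 0
--     current_start = -1
--
--     for i, num in enumerate(arr):
--         if num > 0:
--             if current_len == 0:
--                 current_start = i
--             current_len += 1
--         else:
--             if current_len > max_len:
--                 max_len = current_len
--                 max_start = current_start
--             current_len = 0
--
--     if current_len > max_len:
--         max_start = current_start
--
--     return max_start
-- ===== SOURCE B (Python) =====
-- def find_max_positive_subarray_start(arr):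
--     # Phase 1: split into maximal runs of positive numbers as (length, start) records.
--     runs = []
--     i, n = 0, len(arr)
--     while i < n:
--         if arr[i] > 0:
--             j = i
--             while j < n and arr[j] > 0:
--                 j += 1
--             runs.append((j - i, i))
--             i = j
--         else:
--             i += 1
--     # Phase 2: pick the first longest run (max keeps the first maximal element).
--     if not runs:
--         return -1
--     return max(runs, key=lambda r: r[0])[1]
-- ===== Notes on version B (the rewrite author's own statement) =====
-- stated objective: alternative
-- what changed: Replaces A's fused online scan carrying four state variables with a two-phase algorithm: first extract all maximal positive runs as (length, start) records via a nested skip/span loop, then select the first longest run with max(key=len).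
import Mathlib
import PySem

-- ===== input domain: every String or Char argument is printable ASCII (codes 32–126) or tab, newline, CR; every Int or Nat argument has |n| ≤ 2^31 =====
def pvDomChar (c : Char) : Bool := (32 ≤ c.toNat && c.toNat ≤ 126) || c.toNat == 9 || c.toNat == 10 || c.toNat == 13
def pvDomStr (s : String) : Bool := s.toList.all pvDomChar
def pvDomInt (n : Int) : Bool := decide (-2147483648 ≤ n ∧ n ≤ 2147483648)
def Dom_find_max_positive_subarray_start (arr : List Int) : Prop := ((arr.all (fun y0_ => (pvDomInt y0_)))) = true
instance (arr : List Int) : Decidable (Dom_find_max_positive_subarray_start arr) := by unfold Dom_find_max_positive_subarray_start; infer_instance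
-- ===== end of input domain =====

-- B replaces A's fused four-variable online scan by a two-phase algorithm: extract maximal
-- positive runs as (length, start) records, then select the first longest run.

-- ===== PORT A =====
-- A's for-loop over enumerate(arr) with state (max_len, max_start, current_len, current_start).
def pvLoopA : List Int → Int → Int → Int → Int → Int → Int × Int × Int × Int
  | [], _, ml, ms, cl, cs => (ml, ms, cl, cs)
  | x :: xs, i, ml, ms, cl, cs =>
    if x > 0 then
      let cs' := if cl = 0 then i else cs
      pvLoopA xs (i + 1) ml ms (cl + 1) cs'
    else
      if cl > ml then pvLoopA xs (i + 1) cl cs 0 cs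
      else pvLoopA xs (i + 1) ml ms 0 cs

def find_max_positive_subarray_start (arr : List Int) : Int :=
  let st := pvLoopA arr 0 0 (-1) 0 (-1)
  if st.2.2.1 > st.1 then st.2.2.2 else st.2.1

-- ===== PORT B =====
-- Inner while: count the leading positive run, returning (run length, rest of the list).
def pvSpanPos : List Int → Int × List Int
  | [] => (0, [])
  | x :: xs => if x > 0 then let p := pvSpanPos xs; (p.1 + 1, p.2) else (0, x :: xs)

theorem pvSpanPos_len_le : ∀ (xs : List Int), (pvSpanPos xs).2.length ≤ xs.length
  | [] => le_refl _
  | x :: xs => by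
    simp only [pvSpanPos]
    split
    · exact le_trans (pvSpanPos_len_le xs) (Nat.le_succ _)
    · exact le_refl _

-- Outer while: collect all maximal positive runs as (length, start) records.
def pvRuns : List Int → Int → List (Int × Int)
  | [], _ => []
  | x :: xs, i =>
    if x > 0 then
      let p := pvSpanPos xs
      (p.1 + 1, i) :: pvRuns p.2 (i + p.1 + 1)
    else pvRuns xs (i + 1)
termination_by xs _ => xs.length
decreasing_by
  · exact Nat.lt_succ_of_le (pvSpanPos_len_le xs)
  · simp

-- Python's max(runs, key=len): keep the first run, replace only by strictly longer ones.
def pvPickMax : List (Int × Int) → Int × Int → Int × Int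
  | [], best => best
  | r :: rs, best => pvPickMax rs (if r.1 > best.1 then r else best)

def find_max_positive_subarray_start_alt (arr : List Int) : Int :=
  match pvRuns arr 0 with
  | [] => -1
  | r :: rs => (pvPickMax rs r).2

-- ===== PRECONDITION & SPEC =====
def Spec_find_max_positive_subarray_start (arr : List Int) (out : Int) : Prop := out = find_max_positive_subarray_start_alt arr
instance (arr : List Int) (out : Int) : Decidable (Spec_find_max_positive_subarray_start arr out) := by unfold Spec_find_max_positive_subarray_start; infer_instance

-- ===== CLAIM (what is proved, stated in full; the proofs are below) =====
def Claim_equal_find_max_positive_subarray_start : Prop := ∀ (arr : List Int), Dom_find_max_positive_subarray_start arr → Spec_find_max_positive_subarray_start arr (find_max_positive_subarray_start arr)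

-- ===== LEMMAS AND PROOFS =====

def pvFinish (st : Int × Int × Int × Int) : Int :=
  if st.2.2.1 > st.1 then st.2.2.2 else st.2.1

-- The run list seen from the middle of a scan: if a run of length cl starting at cs is open,
-- it merges with the leading positive span of xs.
def pvRunsC (xs : List Int) (i cl cs : Int) : List (Int × Int) :=
  if cl = 0 then pvRuns xs i
  else ((cl + (pvSpanPos xs).1, cs)) :: pvRuns (pvSpanPos xs).2 (i + (pvSpanPos xs).1)

theorem pvSpanPos_nonneg : ∀ (xs : List Int), 0 ≤ (pvSpanPos xs).1
  | [] => le_refl _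
  | x :: xs => by
    simp only [pvSpanPos]
    split
    · have := pvSpanPos_nonneg xs; omega
    · exact le_refl _

theorem pvRuns_head_pos : ∀ (xs : List Int) (i : Int) (r : Int × Int) (rs : List (Int × Int)),
    pvRuns xs i = r :: rs → 0 < r.1
  | [], i, r, rs => by simp [pvRuns]
  | x :: xs, i, r, rs => by
    simp only [pvRuns]
    split
    · intro h
      have := pvSpanPos_nonneg xs
      cases h
      simp only
      omega
    · exact pvRuns_head_pos xs (i + 1) r rs
termination_by xs => xs.length
decreasing_by
  · exact Nat.lt_succ_of_le (le_refl _)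

theorem pvPickMax_snd (rs : List (Int × Int)) (b : Int × Int) (hb : 0 < b.1) :
    (pvPickMax rs b).2 = (pvPickMax (b :: rs) (0, -1)).2 := by
  simp [pvPickMax, hb]

theorem pvRunsC_step_pos (x : Int) (xs : List Int) (i cl cs : Int) (hx : x > 0)
    (hcl : 0 ≤ cl) :
    pvRunsC (x :: xs) i cl cs = pvRunsC xs (i + 1) (cl + 1) (if cl = 0 then i else cs) := by
  by_cases h : cl = 0
  · subst h
    simp only [pvRunsC, if_neg (by omega : ¬ (0:Int) + 1 = 0), pvRuns, if_pos hx, if_true]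
    congr 1
    · congr 1 <;> ring
    · congr 1
      ring
  · simp only [pvRunsC, if_neg h, if_neg (by omega : ¬ cl + 1 = 0),
      pvSpanPos, if_pos hx]
    congr 1
    · congr 1 <;> ring
    · congr 1
      ring

theorem pvLoopA_eq : ∀ (xs : List Int) (i ml ms cl cs : Int), 0 ≤ ml → 0 ≤ cl →
    pvFinish (pvLoopA xs i ml ms cl cs) = (pvPickMax (pvRunsC xs i cl cs) (ml, ms)).2
  | [], i, ml, ms, cl, cs, hml, hcl => by
    by_cases h : cl = 0
    · subst h
      simp only [pvLoopA, pvFinish, pvRunsC, pvRuns]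
      exact if_neg (by omega)
    · simp only [pvLoopA, pvFinish, pvRunsC, if_neg h, pvSpanPos, pvRuns, pvPickMax,
        Int.add_zero]
      by_cases hgt : cl > ml
      · rw [if_pos hgt, if_pos (by omega)]
      · rw [if_neg hgt, if_neg (by omega)]
  | x :: xs, i, ml, ms, cl, cs, hml, hcl => by
    simp only [pvLoopA]
    by_cases hx : x > 0
    · rw [if_pos hx, pvLoopA_eq xs (i + 1) ml ms (cl + 1) (if cl = 0 then i else cs) hml
        (by omega), pvRunsC_step_pos x xs i cl cs hx hcl]
    · rw [if_neg hx]
      have hc : pvRunsC xs (i + 1) 0 cs = pvRuns xs (i + 1) := by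
        simp [pvRunsC]
      by_cases h : cl = 0
      · rw [if_neg (by omega : ¬ cl > ml), pvLoopA_eq xs (i + 1) ml ms 0 cs hml (le_refl 0), hc]
        have : pvRunsC (x :: xs) i cl cs = pvRuns xs (i + 1) := by
          simp [pvRunsC, h, pvRuns, hx]
        rw [this]
      · have hruns : pvRunsC (x :: xs) i cl cs = (cl, cs) :: pvRuns xs (i + 1) := by
          simp [pvRunsC, h, pvSpanPos, hx, pvRuns]
        rw [hruns]
        by_cases hgt : cl > ml
        · rw [if_pos hgt, pvLoopA_eq xs (i + 1) cl cs 0 cs (by omega) (le_refl 0), hc]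
          simp [pvPickMax, hgt]
        · rw [if_neg hgt, pvLoopA_eq xs (i + 1) ml ms 0 cs hml (le_refl 0), hc]
          simp [pvPickMax, hgt]

theorem alt_eq_pick (arr : List Int) :
    find_max_positive_subarray_start_alt arr = (pvPickMax (pvRuns arr 0) (0, -1)).2 := by
  unfold find_max_positive_subarray_start_alt
  cases hr : pvRuns arr 0 with
  | nil => simp [pvPickMax]
  | cons r rs =>
    show (pvPickMax rs r).2 = (pvPickMax (r :: rs) (0, -1)).2
    exact pvPickMax_snd rs r (pvRuns_head_pos arr 0 r rs hr)

-- ===== VERDICT (by name: the statement is the Claim_ definition above) =====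
theorem find_max_positive_subarray_start_spec : Claim_equal_find_max_positive_subarray_start := by
  intro arr _
  unfold Spec_find_max_positive_subarray_start find_max_positive_subarray_start
  rw [alt_eq_pick]
  have h := pvLoopA_eq arr 0 0 (-1) 0 (-1) (le_refl 0) (le_refl 0)
  simp only [pvRunsC] at h
  exact h
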